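-- pv_equiv track=rewrite | github.com/eladsegal/less-bimodal-sup | src/utils/spans.py | _sequence_ids_to_ranges
-- ===== SOURCE A (Python) =====
-- from typing import List, Tuple, Sequence
--
-- def _sequence_ids_to_ranges(sequence_ids: List[int]) -> List[Tuple[int, int]]:
--     sequence_ranges = []
--     range_start, range_end = None, None
--     for i, id_ in enumerate(sequence_ids):
--         if range_start is not None and id_ != sequence_ids[range_start]:
--             range_end = i - 1
--             sequence_ranges.append((range_start, range_end))
--             range_start = None
--         if range_start is None and id_ is not None:
--             range_start = i
--     if range_start is not None:
--         range_end = len(sequence_ids) - 1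
--         sequence_ranges.append((range_start, range_end))
--     return sequence_ranges
-- ===== SOURCE B (Python) =====
-- from typing import List, Tuple
--
-- def _sequence_ids_to_ranges(sequence_ids: List[int]) -> List[Tuple[int, int]]:
--     ids = list(sequence_ids)
--     starts = [i for i, (prev, cur) in enumerate(zip([None] + ids, ids))
--               if cur is not None and prev != cur]
--     ends = [i for i, (cur, nxt) in enumerate(zip(ids, ids[1:] + [None]))
--             if cur is not None and cur != nxt]
--     return list(zip(starts, ends))
-- ===== Notes on version B (the rewrite author's own statement) =====
-- stated objective: alternative
-- what changed: Replaces the single-pass range_start/range_end state machine by three staged passes: two shifted-pair comparisons (zip with [None]+ids and ids[1:]+[None]) independently compute the list of run-start indices and run-end indices, which are then paired with zip.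
import Mathlib
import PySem

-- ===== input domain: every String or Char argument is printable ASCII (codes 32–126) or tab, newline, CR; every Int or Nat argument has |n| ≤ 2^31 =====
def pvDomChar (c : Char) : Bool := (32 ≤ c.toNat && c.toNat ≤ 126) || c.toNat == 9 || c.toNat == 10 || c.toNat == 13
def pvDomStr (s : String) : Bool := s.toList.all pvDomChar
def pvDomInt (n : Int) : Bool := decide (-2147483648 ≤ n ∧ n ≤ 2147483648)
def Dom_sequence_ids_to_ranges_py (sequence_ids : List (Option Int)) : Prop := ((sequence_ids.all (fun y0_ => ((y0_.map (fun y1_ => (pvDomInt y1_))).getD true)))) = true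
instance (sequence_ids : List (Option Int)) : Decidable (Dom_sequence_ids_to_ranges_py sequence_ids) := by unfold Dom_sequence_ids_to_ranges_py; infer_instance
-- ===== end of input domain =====

-- B replaces A's single-pass state machine by three staged passes: shifted-pair
-- comparisons compute run starts and run ends independently, then zip pairs them (alternative).


-- ===== PORT A =====
-- the for loop as structural recursion over the remaining list; state (ranges, rs=range_start);
-- sequence_ids[range_start] is ported with pyGet? (.getD none: the index is always a previously
-- visited position, so in range, and Python never raises here)
def pvLoopA (s : List (Option Int)) (i : Int) (xs : List (Option Int))
    (ranges : List (Int × Int)) (rs : Option Int) : List (Int × Int) :=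
  match xs with
  | [] =>
    match rs with
    | some r => ranges ++ [(r, (s.length : Int) - 1)]
    | none => ranges
  | id_ :: rest =>
    match rs with
    | some r =>
      if id_ ≠ (PySem.List.pyGet? s r).getD none then
        -- close the range; the same iteration's second `if` then sees range_start = None
        if id_.isSome then
          pvLoopA s (i + 1) rest (ranges ++ [(r, i - 1)]) (some i)
        else
          pvLoopA s (i + 1) rest (ranges ++ [(r, i - 1)]) none
      else
        pvLoopA s (i + 1) rest ranges (some r)
    | none =>
      if id_.isSome then pvLoopA s (i + 1) rest ranges (some i)
      else pvLoopA s (i + 1) rest ranges none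

def sequence_ids_to_ranges_py (sequence_ids : List (Option Int)) : List (Int × Int) :=
  pvLoopA sequence_ids 0 sequence_ids [] none

-- ===== PORT B =====
-- Source B: starts = indices where cur is not None and prev != cur (prev from zip([None]+ids, ids));
-- ends = indices where cur is not None and cur != nxt (nxt from zip(ids, ids[1:]+[None]));
-- result = zip(starts, ends). enumerate ↦ zipIdx, the comprehensions ↦ filterMap.
def sequence_ids_to_ranges_py_alt (sequence_ids : List (Option Int)) : List (Int × Int) :=
  let ids := sequence_ids
  let starts := (((none :: ids).zip ids).zipIdx).filterMap
    (fun p => if p.1.2.isSome && !(p.1.1 == p.1.2) then some ((p.2 : Int)) else none)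
  let ends := ((ids.zip (ids.drop 1 ++ [none])).zipIdx).filterMap
    (fun p => if p.1.1.isSome && !(p.1.1 == p.1.2) then some ((p.2 : Int)) else none)
  starts.zip ends

-- ===== PRECONDITION & SPEC =====
def Spec_sequence_ids_to_ranges_py (sequence_ids : List (Option Int)) (out : List (Int × Int)) : Prop := out = sequence_ids_to_ranges_py_alt sequence_ids
instance (sequence_ids : List (Option Int)) (out : List (Int × Int)) : Decidable (Spec_sequence_ids_to_ranges_py sequence_ids out) := by unfold Spec_sequence_ids_to_ranges_py; infer_instance

-- ===== CLAIM (what is proved, stated in full; the proofs are below) =====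
def Claim_equal_sequence_ids_to_ranges_py : Prop := ∀ (sequence_ids : List (Option Int)), Dom_sequence_ids_to_ranges_py sequence_ids → Spec_sequence_ids_to_ranges_py sequence_ids (sequence_ids_to_ranges_py sequence_ids)

-- ===== LEMMAS AND PROOFS =====

-- proof-only reference function: the run decomposition (maximal runs of equal
-- non-None values), to which both ports are reduced
def pvAltGo (i : Int) (xs : List (Option Int)) : List (Int × Int) :=
  match xs with
  | [] => []
  | x :: ys =>
    let grp := ys.takeWhile (· == x)
    let rest := ys.dropWhile (· == x)
    let rlen : Int := (grp.length : Int) + 1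
    let tail := pvAltGo (i + rlen) rest
    if x.isSome then (i, i + rlen - 1) :: tail else tail
termination_by xs.length
decreasing_by simpa using Nat.lt_succ_of_le (ys.length_dropWhile_le _)

-- skipping a leading None one element at a time equals skipping its whole run
lemma pvAltGo_none_cons (i : Int) (xs : List (Option Int)) :
    pvAltGo i (none :: xs) = pvAltGo (i + 1) xs := by
  match xs with
  | [] => simp [pvAltGo]
  | none :: ys =>
      rw [pvAltGo, pvAltGo]
      simp [List.takeWhile, List.dropWhile]
      push_cast; ring_nf
  | some m :: ys =>
      rw [pvAltGo]
      simp [List.takeWhile, List.dropWhile]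

-- A-side main invariant: both states of A's loop against the run decomposition
lemma pvLoop_main (s : List (Option Int)) (xs : List (Option Int)) :
    ∀ (n : ℕ) (acc : List (Int × Int)), s.drop n = xs → n ≤ s.length →
      (pvLoopA s (n : Int) xs acc none = acc ++ pvAltGo (n : Int) xs) ∧
      (∀ (r k : Int), PySem.List.pyGet? s r = some (some k) →
        pvLoopA s (n : Int) xs acc (some r) =
          acc ++ ((r, (n : Int) + ((xs.takeWhile (· == some k)).length : Int) - 1) ::
            pvAltGo ((n : Int) + ((xs.takeWhile (· == some k)).length : Int))
              (xs.dropWhile (· == some k)))) := by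
  induction xs with
  | nil =>
    intro n acc hdrop hn
    have hlen : n = s.length := le_antisymm hn (by simpa using List.drop_eq_nil_iff.mp hdrop)
    constructor
    · simp [pvLoopA, pvAltGo]
    · intro r k _
      simp [pvLoopA, pvAltGo, hlen]
  | cons x ys ih =>
    intro n acc hdrop hn
    have hlt : n < s.length := by
      by_contra h
      rw [List.drop_eq_nil_iff.mpr (by omega)] at hdrop; exact absurd hdrop (by simp)
    have hdrop' : s.drop (n + 1) = ys := by
      rw [← List.drop_drop, hdrop]; rfl
    have hget : s[n]? = some x := by
      rw [← List.head?_drop, hdrop]; rfl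
    have hpy : PySem.List.pyGet? s (n : Int) = some x := by
      rw [PySem.List.pyGet?_natCast]; exact hget
    have hcast : ((n + 1 : ℕ) : Int) = (n : Int) + 1 := by push_cast; ring
    have IH := ih (n + 1) ; rw [hcast] at IH
    constructor
    · -- closed state
      match x with
      | none =>
        rw [pvLoopA, if_neg (by simp)]
        rw [(IH acc hdrop' (by omega)).1, pvAltGo_none_cons]
      | some m =>
        rw [pvLoopA, if_pos (by simp)]
        rw [(IH acc hdrop' (by omega)).2 (n : Int) m (by rw [hpy])]
        rw [pvAltGo]
        simp only [List.takeWhile_cons, List.dropWhile_cons, BEq.rfl, if_true,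
          Option.isSome_some, List.length_cons]
        push_cast; ring_nf
    · -- open state
      intro r k hr
      rw [pvLoopA, hr]
      simp only [Option.getD_some]
      by_cases hxk : x = some k
      · subst hxk
        rw [if_neg (by simp)]
        rw [(IH acc hdrop' (by omega)).2 r k hr]
        simp only [List.takeWhile_cons, List.dropWhile_cons, BEq.rfl, if_true,
          List.length_cons]
        push_cast; ring_nf
      · rw [if_pos (by simpa using hxk)]
        have hbeq : (x == some k) = false := by simpa using hxk
        rw [List.takeWhile_cons, List.dropWhile_cons, hbeq]
        simp only [Bool.false_eq_true, if_false, List.length_nil, Nat.cast_zero, add_zero]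
        match x with
        | none =>
          rw [if_neg (by simp)]
          rw [(IH (acc ++ [(r, (n:Int) - 1)]) hdrop' (by omega)).1, pvAltGo_none_cons]
          simp
        | some m =>
          rw [if_pos (by simp)]
          rw [(IH (acc ++ [(r, (n:Int) - 1)]) hdrop' (by omega)).2 (n : Int) m (by rw [hpy])]
          rw [pvAltGo]
          simp only [List.takeWhile_cons, List.dropWhile_cons, BEq.rfl, if_true,
            Option.isSome_some, List.length_cons, List.append_assoc, List.singleton_append,
            List.cons_append, List.nil_append]
          push_cast; ring_nf

-- B-side proof helpers: the two comprehensions as scans carrying prev / looking at next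
def pvStS (prev : Option Int) (xs : List (Option Int)) (i : Int) : List Int :=
  match xs with
  | [] => []
  | x :: ys =>
    if x.isSome && !(prev == x) then i :: pvStS x ys (i + 1) else pvStS x ys (i + 1)

def pvEnS (xs : List (Option Int)) (i : Int) : List Int :=
  match xs with
  | [] => []
  | x :: ys =>
    if x.isSome && !(x == ys.headD none) then i :: pvEnS ys (i + 1) else pvEnS ys (i + 1)

-- the starts comprehension equals the prev-carrying scan
lemma pvBridgeS (s : List (Option Int)) : ∀ (prev : Option Int) (n : ℕ),
    (((prev :: s).zip s).zipIdx n).filterMap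
      (fun p => if p.1.2.isSome && !(p.1.1 == p.1.2) then some ((p.2 : Int)) else none)
    = pvStS prev s (n : Int) := by
  induction s with
  | nil => intro prev n; simp [pvStS]
  | cons x ys ih =>
    intro prev n
    have hz : (prev :: x :: ys).zip (x :: ys) = (prev, x) :: (x :: ys).zip ys := rfl
    rw [hz, List.zipIdx_cons, List.filterMap_cons, pvStS]
    have hc : ((n + 1 : ℕ) : Int) = (n : Int) + 1 := by push_cast; ring
    by_cases h : (x.isSome && !(prev == x)) = true
    · simp only [h, if_pos]
      rw [ih x (n + 1), hc]
    · simp only [h]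
      simp only [Bool.false_eq_true, if_false]
      rw [ih x (n + 1), hc]

-- the ends comprehension equals the next-looking scan
lemma pvBridgeE (s : List (Option Int)) : ∀ (n : ℕ),
    ((s.zip (s.drop 1 ++ [none])).zipIdx n).filterMap
      (fun p => if p.1.1.isSome && !(p.1.1 == p.1.2) then some ((p.2 : Int)) else none)
    = pvEnS s (n : Int) := by
  induction s with
  | nil => intro n; simp [pvEnS]
  | cons x ys ih =>
    intro n
    have hz : (x :: ys).zip ((x :: ys).drop 1 ++ [none])
        = (x, ys.headD none) :: ys.zip (ys.drop 1 ++ [none]) := by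
      cases ys <;> rfl
    rw [hz, List.zipIdx_cons, List.filterMap_cons, pvEnS]
    have hc : ((n + 1 : ℕ) : Int) = (n : Int) + 1 := by push_cast; ring
    by_cases h : (x.isSome && !(x == ys.headD none)) = true
    · simp only [h, if_pos]
      rw [ih (n + 1), hc]
    · simp only [h]
      simp only [Bool.false_eq_true, if_false]
      rw [ih (n + 1), hc]

-- inside a run the start scan emits nothing and behaves like restarting after the run
lemma pvStS_run (ys : List (Option Int)) : ∀ (k : Int) (i : Int),
    pvStS (some k) ys i
      = pvStS none (ys.dropWhile (· == some k)) (i + ((ys.takeWhile (· == some k)).length : Int)) := by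
  induction ys with
  | nil => intro k i; simp [pvStS]
  | cons y zs ih =>
    intro k i
    by_cases hy : y = some k
    · subst hy
      rw [pvStS]
      simp only [Option.isSome_some, BEq.rfl, Bool.not_true, Bool.and_false,
        Bool.false_eq_true, if_false]
      rw [ih k (i + 1), List.takeWhile_cons, List.dropWhile_cons]
      simp only [BEq.rfl, if_true, List.length_cons]
      push_cast; ring_nf
    · have hbeq : (y == some k) = false := by simpa using hy
      rw [List.takeWhile_cons, List.dropWhile_cons, hbeq]
      simp only [Bool.false_eq_true, if_false, List.length_nil, Nat.cast_zero, add_zero]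
      rw [pvStS, pvStS]
      have h1 : (some k == y) = false := by
        simpa using fun h => hy h.symm
      rw [h1]
      match y with
      | none => simp
      | some m => simp

-- the end scan on a run: the run's last index, then the scan on the remainder
lemma pvEnS_run (ys : List (Option Int)) : ∀ (k : Int) (i : Int),
    pvEnS (some k :: ys) i
      = (i + ((ys.takeWhile (· == some k)).length : Int)) ::
          pvEnS (ys.dropWhile (· == some k)) (i + ((ys.takeWhile (· == some k)).length : Int) + 1) := by
  induction ys with
  | nil => intro k i; simp [pvEnS]
  | cons y zs ih =>
    intro k i
    by_cases hy : y = some k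
    · subst hy
      rw [pvEnS]
      simp only [List.headD_cons, Option.isSome_some, BEq.rfl, Bool.not_true, Bool.and_false,
        Bool.false_eq_true, if_false]
      rw [ih k (i + 1), List.takeWhile_cons, List.dropWhile_cons]
      simp only [BEq.rfl, if_true, List.length_cons]
      congr 1
      · push_cast; ring
      · congr 1
        push_cast; ring
    · have hbeq : (y == some k) = false := by simpa using hy
      rw [List.takeWhile_cons, List.dropWhile_cons, hbeq]
      simp only [Bool.false_eq_true, if_false, List.length_nil, Nat.cast_zero, add_zero]
      rw [pvEnS]
      have h1 : (some k == y) = false := by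
        simpa using fun h => hy h.symm
      simp only [List.headD_cons, h1, Option.isSome_some, Bool.not_false, Bool.and_true,
        if_true, true_and]

-- main B-side lemma: pairing the two scans gives the run decomposition
lemma pvMain : ∀ (n : ℕ) (s : List (Option Int)), s.length ≤ n → ∀ (i : Int),
    (pvStS none s i).zip (pvEnS s i) = pvAltGo i s := by
  intro n
  induction n with
  | zero =>
    intro s hs i
    have : s = [] := List.eq_nil_of_length_eq_zero (by omega)
    subst this; simp [pvStS, pvEnS, pvAltGo]
  | succ n ih =>
    intro s hs i
    match s with
    | [] => simp [pvStS, pvEnS, pvAltGo]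
    | none :: ys =>
      rw [pvStS, pvEnS, pvAltGo_none_cons]
      simp only [Option.isSome_none, Bool.false_and, Bool.false_eq_true, if_false]
      exact ih ys (by simpa using Nat.lt_succ_iff.mp (by simpa using hs)) (i + 1)
    | some k :: ys =>
      rw [pvStS, pvEnS_run, pvStS_run]
      simp only [Option.isSome_some, Bool.true_and, if_pos, Bool.not_false]
      have hbn : ((none : Option Int) == some k) = false := rfl
      rw [hbn]
      simp only [Bool.not_false, if_true]
      rw [List.zip_cons_cons]
      have hrest : (ys.dropWhile (· == some k)).length ≤ n := by
        have := ys.length_dropWhile_le (· == some k)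
        have : (ys.dropWhile (· == some k)).length ≤ ys.length := this
        simp only [List.length_cons] at hs
        omega
      have harith : i + 1 + ((ys.takeWhile (· == some k)).length : Int)
          = i + ((ys.takeWhile (· == some k)).length : Int) + 1 := by ring
      rw [harith, ih (ys.dropWhile (· == some k)) hrest
        (i + ((ys.takeWhile (· == some k)).length : Int) + 1)]
      rw [pvAltGo]
      simp only [Option.isSome_some, if_true]
      congr 1
      · congr 1; ring
      · congr 1; push_cast; ring

-- ===== VERDICT (by name: the statement is the Claim_ definition above) =====
theorem sequence_ids_to_ranges_py_spec : Claim_equal_sequence_ids_to_ranges_py := by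
  intro s _
  unfold Spec_sequence_ids_to_ranges_py sequence_ids_to_ranges_py sequence_ids_to_ranges_py_alt
  have hA := (pvLoop_main s s 0 [] (by simp) (by simp)).1
  simp only [Nat.cast_zero, List.nil_append] at hA
  have hS := pvBridgeS s none 0
  have hE := pvBridgeE s 0
  simp only [Nat.cast_zero] at hS hE
  simp only []
  rw [hS, hE, pvMain s.length s le_rfl 0, hA]
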